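-- pv_equiv track=rewrite | github.com/manred1997/Vinbrain_internship | week4/vi_sample.py | offsets
-- ===== SOURCE A (Python) =====
-- def offsets(token, text): #Slow_token
--     offsets_span = []
--     for i in token:
--         if i == '<unk>': len_i = 1
--         else: len_i = len(i.split("@")[0])
--
--         if not offsets_span:
--             offsets_span.append((0, len_i))
--         else:
--             len_whitespace = len(text[offsets_span[-1][1]:]) - len(text[offsets_span[-1][1]:].lstrip())
--             if len_whitespace > 0:
--                 offsets_span.append((offsets_span[-1][1]+len_whitespace, offsets_span[-1][1]+len_whitespace + len_i))
--             else:
--                 offsets_span.append((offsets_span[-1][1],offsets_span[-1][1] + len_i))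
--     return offsets_span
-- ===== SOURCE B (Python) =====
-- def offsets(token, text):
--     # staged: widths pass, then a precomputed next-non-space jump table, then span emission
--     widths = []
--     for t in token:
--         if t == '<unk>':
--             widths.append(1)
--         else:
--             j = t.find('@')
--             widths.append(len(t) if j < 0 else j)
--     if not widths:
--         return []
--     n = len(text)
--     # nxt[i] = first index j >= i with text[j] not whitespace (or n), built in one backward pass
--     nxt = [n] * (n + 1)
--     for i in range(n - 1, -1, -1):
--         nxt[i] = nxt[i + 1] if text[i].isspace() else i
--     spans = [(0, widths[0])]
--     pos = widths[0]
--     for w in widths[1:]: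
--         if pos <= n:
--             pos = nxt[pos]
--         spans.append((pos, pos + w))
--         pos += w
--     return spans
-- ===== Notes on version B (the rewrite author's own statement) =====
-- stated objective: faster
-- what changed: B runs in three staged passes: it precomputes all token widths (via str.find), builds a next-non-whitespace jump table over the text in one backward pass, then emits spans with O(1) whitespace skips via table lookup, instead of A's single loop that re-slices text[end:] and lstrips the whole remaining suffix at every token.
import Mathlib
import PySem

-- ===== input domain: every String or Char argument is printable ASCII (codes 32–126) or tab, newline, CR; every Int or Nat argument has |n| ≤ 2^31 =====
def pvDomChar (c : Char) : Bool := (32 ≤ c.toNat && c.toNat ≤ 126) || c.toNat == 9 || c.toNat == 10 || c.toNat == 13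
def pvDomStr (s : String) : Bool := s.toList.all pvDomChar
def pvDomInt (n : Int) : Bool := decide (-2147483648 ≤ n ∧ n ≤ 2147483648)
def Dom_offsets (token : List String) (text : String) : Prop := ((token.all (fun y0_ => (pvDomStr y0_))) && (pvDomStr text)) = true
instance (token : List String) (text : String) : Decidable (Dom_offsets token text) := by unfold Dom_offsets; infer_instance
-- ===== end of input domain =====

-- B replaces A's per-token slice+lstrip of the remaining text by three staged passes (token widths,
-- a next-non-whitespace jump table built backward over the text, then span emission with O(1) skips);
-- equivalence of the return values is proved on all inputs.

-- ===== PORT A =====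
-- one loop body of A: len_i from i.split("@")[0] (or 1 for '<unk>'), then append using
-- offsets_span[-1][1] and the lstrip-based whitespace count of text[last:]
def offsetsStepA (cs : List Char) (span : List (Int × Int)) (i : String) : List (Int × Int) :=
  let len_i : Int := if i = "<unk>" then 1
    else (((PySem.Chars.splitOn i.toList ['@']).headD []).length : Int)
  match span.getLast? with
  | none => span ++ [(0, len_i)]
  | some last =>
    let rest := PySem.List.slice cs (some last.2) none
    let len_whitespace : Int := (rest.length : Int) - ((PySem.Chars.lstrip rest).length : Int)
    if len_whitespace > 0 then
      span ++ [(last.2 + len_whitespace, last.2 + len_whitespace + len_i)]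
    else
      span ++ [(last.2, last.2 + len_i)]

def offsets (token : List String) (text : String) : List (Int × Int) :=
  token.foldl (offsetsStepA text.toList) []

-- ===== PORT B =====
-- stage-1 body of Source B: width 1 for '<unk>', else j = t.find('@'); len(t) if j < 0 else j
def widthB (t : String) : Nat :=
  if t = "<unk>" then 1
  else
    let j := PySem.Str.find t "@"
    if j < 0 then t.toList.length else j.toNat

-- stage 2 of Source B: backward fill nxt[i] = nxt[i+1] if text[i].isspace() else i, nxt[n] = n,
-- as the obvious structural recursion building the table for the suffix starting at index i
def wsNext (i : Nat) : List Char → List Nat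
  | [] => [i]
  | c :: cs =>
    let rest := wsNext (i + 1) cs
    (if PySem.Chars.isspace c then rest.headD 0 else i) :: rest

-- stage 3 of Source B: for w in widths[1:]: if pos <= n: pos = nxt[pos]; append (pos, pos+w); pos += w
def goB (nxt : List Nat) (n : Nat) : List Nat → Nat → List (Int × Int)
  | [], _ => []
  | w :: ws, pos =>
    let p := if pos ≤ n then nxt.getD pos 0 else pos
    ((p : Int), ((p + w : Nat) : Int)) :: goB nxt n ws (p + w)

def offsets_alt (token : List String) (text : String) : List (Int × Int) :=
  let widths := token.map widthB
  match widths with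
  | [] => []
  | w :: ws =>
    let cs := text.toList
    let nxt := wsNext 0 cs
    ((0 : Int), (w : Int)) :: goB nxt cs.length ws w

-- ===== PRECONDITION & SPEC =====
def Spec_offsets (token : List String) (text : String) (out : List (Int × Int)) : Prop := out = offsets_alt token text
instance (token : List String) (text : String) (out : List (Int × Int)) : Decidable (Spec_offsets token text out) := by unfold Spec_offsets; infer_instance

-- ===== CLAIM (what is proved, stated in full; the proofs are below) =====
def Claim_equal_offsets : Prop := ∀ (token : List String) (text : String), Dom_offsets token text → Spec_offsets token text (offsets token text)

-- ===== LEMMAS AND PROOFS =====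

-- number of leading whitespace characters (proof-side characterisation)
def wsFrom : List Char → Nat
  | [] => 0
  | c :: cs => if PySem.Chars.isspace c then wsFrom cs + 1 else 0

-- head of Chars.splitOn s ['@'] is the prefix of s before the first '@'
theorem splitOn_go_head (fuel : Nat) : ∀ (l cur : List Char) (acc : List (List Char)),
    l.length ≤ fuel →
    ∃ tail, PySem.Chars.splitOn.go ['@'] fuel l cur acc
      = acc.reverse ++ (cur.reverse ++ l.takeWhile (fun c => c != '@')) :: tail := by
  induction fuel with
  | zero =>
    intro l cur acc h
    have hl : l = [] := List.eq_nil_of_length_eq_zero (Nat.le_zero.mp h)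
    subst hl
    exact ⟨[], by simp [PySem.Chars.splitOn.go]⟩
  | succ f ih =>
    intro l cur acc h
    cases l with
    | nil => exact ⟨[], by simp [PySem.Chars.splitOn.go]⟩
    | cons c rest =>
      by_cases hc : c = '@'
      · subst hc
        obtain ⟨tail, htail⟩ := ih rest [] (cur.reverse :: acc) (by simpa using h)
        refine ⟨rest.takeWhile (fun c => c != '@') :: tail, ?_⟩
        simp [PySem.Chars.splitOn.go, List.isPrefixOf, htail]
      · obtain ⟨tail, htail⟩ := ih rest (c :: cur) acc (by simpa using Nat.le_of_succ_le_succ h)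
        refine ⟨tail, ?_⟩
        have hc2 : ¬ ('@' = c) := fun h' => hc h'.symm
        simp [PySem.Chars.splitOn.go, List.isPrefixOf, hc, hc2, htail]

-- takeWhile (≠ '@') measures the index of the first '@'
theorem takeWhile_len_at : ∀ (cs : List Char) (k : Nat), cs[k]? = some '@' →
    (∀ i, i < k → cs[i]? ≠ some '@') → (cs.takeWhile (fun c => c != '@')).length = k := by
  intro cs
  induction cs with
  | nil => intro k h _; simp at h
  | cons c cs ih =>
    intro k hk hlt
    cases k with
    | zero =>
      simp only [List.getElem?_cons_zero, Option.some.injEq] at hk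
      subst hk
      simp
    | succ k =>
      have hc : c ≠ '@' := by
        have := hlt 0 (Nat.succ_pos _)
        simpa using this
      have hrec := ih k (by simpa using hk)
        (fun i hi => by simpa using hlt (i + 1) (by omega))
      simp [hc, hrec]

-- a singleton is a prefix exactly at its character
theorem singleton_prefix_head (l : List Char) (c : Char) : [c] <+: l ↔ l.head? = some c := by
  constructor
  · rintro ⟨t, rfl⟩; rfl
  · intro h
    cases l with
    | nil => simp at h
    | cons a t =>
      simp only [List.head?_cons, Option.some.injEq] at h
      subst h
      exact ⟨t, rfl⟩

-- B's find-based width is the length of the prefix before the first '@'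
theorem widthB_take (cs : List Char) :
    (if PySem.Chars.find cs ['@'] < 0 then cs.length else (PySem.Chars.find cs ['@']).toNat)
      = (cs.takeWhile (fun c => c != '@')).length := by
  by_cases hneg : PySem.Chars.find cs ['@'] = -1
  · have hinf : ¬ ['@'] <:+: cs := (PySem.Chars.find_eq_neg_one_iff cs ['@']).mp hneg
    have hmem : ∀ c ∈ cs, (c != '@') = true := by
      intro c hc
      by_contra h
      simp only [bne_iff_ne, ne_eq, not_not] at h
      subst h
      exact hinf ((List.singleton_infix_iff '@' cs).mpr hc)
    rw [List.takeWhile_eq_self_iff.mpr hmem]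
    simp [hneg]
  · have h0 : 0 ≤ PySem.Chars.find cs ['@'] := by
      have := PySem.Chars.neg_one_le_find cs ['@']
      omega
    obtain ⟨hpre, hmin⟩ := PySem.Chars.find_spec (s := cs) (sub := ['@']) h0
    have hnotlt : ¬ PySem.Chars.find cs ['@'] < 0 := by omega
    rw [if_neg hnotlt]
    refine (takeWhile_len_at cs _ ?_ ?_).symm
    · rw [← List.head?_drop]
      exact (singleton_prefix_head _ _).mp hpre
    · intro i hi hc
      exact hmin i hi ((singleton_prefix_head _ _).mpr (by rw [List.head?_drop]; exact hc))

-- A's len_i equals B's scanned width (as an Int)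
theorem lenA_eq_widthB (i : String) :
    (if i = "<unk>" then (1 : Int)
      else (((PySem.Chars.splitOn i.toList ['@']).headD []).length : Int)) = (widthB i : Int) := by
  unfold widthB
  by_cases hi : i = "<unk>"
  · simp [hi]
  · obtain ⟨tail, htail⟩ := splitOn_go_head (i.toList.length + 1) i.toList [] [] (by omega)
    simp only [List.reverse_nil, List.nil_append] at htail
    simp only [hi, if_false]
    unfold PySem.Chars.splitOn
    rw [htail]
    simp [← widthB_take i.toList]

theorem wsFrom_nat (cs : List Char) :
    wsFrom cs + (List.dropWhile PySem.Chars.isspace cs).length = cs.length := by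
  induction cs with
  | nil => rfl
  | cons c cs ih =>
    by_cases hc : PySem.Chars.isspace c
    · simp [wsFrom, hc]; omega
    · simp [wsFrom, hc]

-- the lstrip-based whitespace count is the leading-whitespace count
theorem wsFrom_eq (cs : List Char) :
    ((cs.length : Int) - ((PySem.Chars.lstrip cs).length : Int)) = ((wsFrom cs : Nat) : Int) := by
  have := wsFrom_nat cs
  simp only [PySem.Chars.lstrip]
  omega

-- the jump table: entry k of the table for the suffix at i is i + k + leading whitespace there
theorem wsNext_getD (cs : List Char) : ∀ (i k : Nat), k ≤ cs.length →
    ((wsNext i cs)[k]?).getD 0 = i + k + wsFrom (cs.drop k) := by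
  induction cs with
  | nil =>
    intro i k h
    have hk : k = 0 := Nat.le_zero.mp (by simpa using h)
    subst hk
    simp [wsNext, wsFrom]
  | cons c cs ih =>
    intro i k h
    cases k with
    | zero =>
      by_cases hc : PySem.Chars.isspace c
      · have h0 := ih (i + 1) 0 (Nat.zero_le _)
        rw [← List.head?_eq_getElem?] at h0
        simp only [List.drop_zero] at h0
        simp [wsNext, hc, wsFrom, h0]
        omega
      · simp [wsNext, hc, wsFrom]
    | succ k =>
      have hk := ih (i + 1) k (by simpa using Nat.le_of_succ_le_succ h)
      simp [wsNext, hk]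
      omega

-- stage-3 step: the guarded table lookup is exactly "skip leading whitespace from pos"
theorem goB_pos (cs : List Char) (pos : Nat) :
    (if pos ≤ cs.length then (wsNext 0 cs).getD pos 0 else pos) = pos + wsFrom (cs.drop pos) := by
  by_cases h : pos ≤ cs.length
  · simpa [h] using wsNext_getD cs 0 pos h
  · have : cs.drop pos = [] := List.drop_eq_nil_of_le (by omega)
    simp [h, this, wsFrom]

-- one A-step from a state whose last recorded end is ↑pos
theorem stepA_eq (cs : List Char) (span : List (Int × Int)) (t : String) (pos : Nat) (s : Int)
    (h : span.getLast? = some (s, (pos : Int))) :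
    offsetsStepA cs span t
      = span ++ [(((pos + wsFrom (cs.drop pos) : Nat) : Int),
                  ((pos + wsFrom (cs.drop pos) + widthB t : Nat) : Int))] := by
  have hslice : PySem.List.slice cs (some ((pos : Nat) : Int)) none = cs.drop pos :=
    PySem.List.slice_from_natCast cs pos
  have hws := wsFrom_eq (cs.drop pos)
  simp only [offsetsStepA, h, hslice, lenA_eq_widthB, hws]
  split_ifs with hpos
  · push_cast
    ring_nf
  · have h0 : wsFrom (cs.drop pos) = 0 := by omega
    simp [h0]

theorem main_inv (cs : List Char) (ts : List String) : ∀ (pos : Nat) (s : Int) (acc : List (Int × Int)),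
    acc.getLast? = some (s, (pos : Int)) →
    ts.foldl (offsetsStepA cs) acc = acc ++ goB (wsNext 0 cs) cs.length (ts.map widthB) pos := by
  induction ts with
  | nil => intro pos s acc _; simp [goB]
  | cons t ts ih =>
    intro pos s acc h
    have hstep := stepA_eq cs acc t pos s h
    have hlast : (acc ++ [(((pos + wsFrom (cs.drop pos) : Nat) : Int),
        ((pos + wsFrom (cs.drop pos) + widthB t : Nat) : Int))]).getLast?
        = some (((pos + wsFrom (cs.drop pos) : Nat) : Int),
                ((pos + wsFrom (cs.drop pos) + widthB t : Nat) : Int)) := by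
      simp
    have hrec := ih (pos + wsFrom (cs.drop pos) + widthB t) _ _ hlast
    simp only [List.foldl_cons, hstep, hrec, List.map_cons, goB, goB_pos,
      List.append_assoc, List.cons_append, List.nil_append]

-- ===== VERDICT (by name: the statement is the Claim_ definition above) =====
theorem offsets_spec : Claim_equal_offsets := by
  intro token text _
  unfold Spec_offsets offsets offsets_alt
  cases token with
  | nil => simp
  | cons t ts =>
    have h0 : offsetsStepA text.toList [] t = [((0 : Int), ((widthB t : Nat) : Int))] := by
      simp only [offsetsStepA, List.getLast?_nil, lenA_eq_widthB]
      simp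
    have hmain := main_inv text.toList ts (widthB t) 0 [((0 : Int), ((widthB t : Nat) : Int))] (by simp)
    simp only [List.foldl_cons, h0, hmain, List.map_cons, List.cons_append, List.nil_append]
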